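-- pv_equiv track=rewrite | github.com/gtavella/Esami | 05-07-22/es2.py | esiste_sottolista_strett_crescente
-- ===== SOURCE A (Python) =====
-- def esiste_sottolista_strett_crescente(sottoliste):
--     # itera per ogni sottolista
--     for sottolista in sottoliste:
--         # itera nella sottolista fin quando non trovi almeno due valori che NON sono strettamente crescenti
--         # questo soddisfa la condizione che l'intera sottolista non e' strettamente crescente
--         # seleziona il primo valore
--         ultimo_numero = sottolista[0]
--         # indice mobile, parti dal secondo elemento della sottolista
--         i = 1
--         # inizializza
--         strettamente_crescenti = True
--         # parti dal secondo elemento della sottolista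
--         while strettamente_crescenti and i<len(sottolista):
--             # se trovi un valore che e' maggiore dell'ultimo, allora la sottolista finora e' strettamente crescente
--             # quindi questo valore attuale diventa l'ultimo nella prossima iterazione
--             if sottolista[i] > ultimo_numero:
--                 ultimo_numero = sottolista[i]
--             # se ho trovato almeno un caso di valori non strettamente crescenti, esco dal loop
--             # perche' questo mi basta per dire che l'intera sottolista NON e' strettamente crescente
--             else:
--                 # esco dal while loop
--                 strettamente_crescenti = False
--             i += 1
--         # siccome per soddisfare la condizione richiesta nella traccia, nessuna sottolista puo' avere valori strettamente crescenti
--         # se esco dal while loop (cioe' ho iterato per tutta la sottolista) e mi dice che tutti i valori erano strettamente crescenti,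
--         # allora vuol dire che esiste almeno una sottolista i cui valori sono tutti strettamente crescenti, il che e' proprio quello
--         # che non voglio si verifichi. Quindi ritorna vero, cioe' esiste almeno una sottolista strettamente crescente
--         if strettamente_crescenti:
--             return True
--     # significa che hai verificato tutte le sottoliste, e nessuna sottolista ha valori strettamente crescenti,
--     # cioe' che non ne esiste nessuna che abbia valori strettamente crescenti
--     return False
-- ===== SOURCE B (Python) =====
-- def esiste_sottolista_strett_crescente(sottoliste):
--     # strictly increasing  <=>  already in nondecreasing order and all elements distinct
--     return any(s == sorted(s) and len(set(s)) == len(s) for s in sottoliste)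
-- ===== Notes on version B (the rewrite author's own statement) =====
-- stated objective: simpler
-- what changed: Replaces A's index-driven while-loop scan with a flag by a one-line any() over a sort-plus-distinctness test (s == sorted(s) and len(set(s)) == len(s)); Pre_ excludes exactly the inputs where A raises IndexError on an empty sublist.
import Mathlib
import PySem

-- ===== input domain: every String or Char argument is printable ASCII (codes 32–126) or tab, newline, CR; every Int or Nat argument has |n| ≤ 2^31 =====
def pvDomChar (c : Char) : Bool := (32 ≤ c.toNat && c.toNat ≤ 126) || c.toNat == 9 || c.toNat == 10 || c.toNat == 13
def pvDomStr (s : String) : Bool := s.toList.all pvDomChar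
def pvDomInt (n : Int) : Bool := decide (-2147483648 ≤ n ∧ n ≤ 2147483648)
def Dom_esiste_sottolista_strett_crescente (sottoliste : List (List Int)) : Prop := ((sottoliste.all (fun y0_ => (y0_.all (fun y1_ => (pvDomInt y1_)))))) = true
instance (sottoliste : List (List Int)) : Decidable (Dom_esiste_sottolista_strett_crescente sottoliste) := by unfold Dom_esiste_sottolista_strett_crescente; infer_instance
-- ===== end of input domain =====

-- B replaces A's index-driven while-loop scan by any() over a sort-plus-distinctness test (simpler, one line).

-- ===== PORT A =====
-- the while loop: state = (ultimo_numero, i); runs while i < len(sottolista) and the flag stays true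
def pvALoop (s : List Int) (ultimo : Int) (i : Nat) : Bool :=
  if h : i < s.length then
    if ultimo < s[i] then pvALoop s s[i] (i + 1) else false
  else true
termination_by s.length - i

def esiste_sottolista_strett_crescente (sottoliste : List (List Int)) : Bool :=
  match sottoliste with
  | [] => false
  | s :: rest =>
    match PySem.List.pyGet? s 0 with        -- sottolista[0]; none = IndexError (excluded by Pre_)
    | none => false
    | some u => if pvALoop s u 1 then true else esiste_sottolista_strett_crescente rest

-- ===== PORT B =====
-- per-sublist test:  s == sorted(s) and len(set(s)) == len(s)
def pvBCheck (s : List Int) : Bool :=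
  decide (s = PySem.List.sorted s (fun x => x) false) && (PySem.Set.ofList s).length == s.length

def esiste_sottolista_strett_crescente_alt (sottoliste : List (List Int)) : Bool :=
  sottoliste.any pvBCheck

-- ===== PRECONDITION & SPEC =====
-- Pre_ excludes exactly the inputs on which A raises IndexError: those where some empty sublist
-- is not preceded by a strictly increasing one (A accesses sottolista[0] of that empty sublist).
def Pre_esiste_sottolista_strett_crescente (sottoliste : List (List Int)) : Prop :=
  ∀ i, (h : i < sottoliste.length) → sottoliste[i] = [] →
    ∃ j, ∃ _ : j < i, List.IsChain (· < ·) (sottoliste[j]'(by omega))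
instance (sottoliste : List (List Int)) : Decidable (Pre_esiste_sottolista_strett_crescente sottoliste) := by unfold Pre_esiste_sottolista_strett_crescente; infer_instance

def pvWitness_esiste_sottolista_strett_crescente : List (List Int) := [[3, 1], [1, 2]]

def Spec_esiste_sottolista_strett_crescente (sottoliste : List (List Int)) (out : Bool) : Prop := out = esiste_sottolista_strett_crescente_alt sottoliste
instance (sottoliste : List (List Int)) (out : Bool) : Decidable (Spec_esiste_sottolista_strett_crescente sottoliste out) := by unfold Spec_esiste_sottolista_strett_crescente; infer_instance

-- ===== CLAIM (what is proved, stated in full; the proofs are below) =====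
def Claim_equal_esiste_sottolista_strett_crescente : Prop := ∀ (sottoliste : List (List Int)), Dom_esiste_sottolista_strett_crescente sottoliste → Pre_esiste_sottolista_strett_crescente sottoliste → Spec_esiste_sottolista_strett_crescente sottoliste (esiste_sottolista_strett_crescente sottoliste)
-- ===== LEMMAS AND PROOFS =====

-- the while loop succeeds iff the chain (ultimo :: remaining elements) is strictly increasing
theorem pvALoop_iff (s : List Int) (u : Int) (i : Nat) :
    pvALoop s u i = true ↔ List.IsChain (· < ·) (u :: s.drop i) := by
  rw [pvALoop]
  by_cases h : i < s.length
  · have hdrop : s.drop i = s[i] :: s.drop (i + 1) := List.drop_eq_getElem_cons h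
    rw [hdrop]
    by_cases hu : u < s[i]
    · simp only [h, hu, dif_pos, if_pos]
      rw [pvALoop_iff s s[i] (i + 1), List.isChain_cons_cons]
      constructor
      · intro hc; exact ⟨hu, hc⟩
      · intro hc; exact hc.2
    · simp only [h, hu, dif_pos, if_neg, not_false_iff]
      constructor
      · intro hfalse; exact absurd hfalse (by simp)
      · intro hc; exact absurd (List.isChain_cons_cons.mp hc).1 hu
  · have : s.drop i = [] := List.drop_eq_nil_of_le (by omega)
    simp only [h, this, dif_neg, not_false_iff]
    simp [List.IsChain.singleton u]
termination_by s.length - i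

-- B's per-sublist test is exactly strict increase
theorem pvBCheck_iff (s : List Int) : pvBCheck s = true ↔ List.IsChain (· < ·) s := by
  unfold pvBCheck
  rw [Bool.and_eq_true, decide_eq_true_iff, beq_iff_eq, List.isChain_iff_pairwise]
  constructor
  · rintro ⟨hsort, hlen⟩
    have hle : s.Pairwise (· ≤ ·) := by
      have := PySem.List.sorted_pairwise (xs := s) (key := fun x : Int => x)
      rw [← hsort] at this; exact this
    have hnd : s.Nodup := by
      by_contra hnot
      have hperm : (PySem.Set.ofList s).Perm s.dedup := by
        apply List.Perm.symm
        apply (List.perm_ext_iff_of_nodup s.nodup_dedup (PySem.Set.nodup_ofList _)).mpr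
        intro a; rw [List.mem_dedup, PySem.Set.mem_ofList]
      have h1 : (PySem.Set.ofList s).length = s.dedup.length := hperm.length_eq
      have h2 : s.dedup.length < s.length := by
        rcases lt_or_eq_of_le (List.Sublist.length_le s.dedup_sublist) with h | h
        · exact h
        · exact absurd (s.dedup_eq_self.mp (List.Sublist.eq_of_length s.dedup_sublist h)) hnot
      omega
    have hne : s.Pairwise (· ≠ ·) := hnd
    exact (hle.and hne).imp (fun ⟨h1, h2⟩ => lt_of_le_of_ne h1 h2)
  · intro hlt
    have hle : s.Pairwise (fun a b : Int => a ≤ b) := hlt.imp le_of_lt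
    have hnd : s.Nodup := hlt.imp ne_of_lt
    refine ⟨(PySem.List.sorted_eq_self_of_pairwise s (fun x : Int => x) hle).symm, ?_⟩
    rw [PySem.Set.ofList_eq_self_of_nodup s hnd]

theorem pre_tail (s : List Int) (rest : List (List Int))
    (hp : Pre_esiste_sottolista_strett_crescente (s :: rest))
    (hnc : ¬ List.IsChain (· < ·) s) : Pre_esiste_sottolista_strett_crescente rest := by
  intro i hi hemp
  obtain ⟨j, hj, hc⟩ := hp (i + 1) (by simpa using Nat.succ_lt_succ hi) (by simpa using hemp)
  match j, hj with
  | 0, _ => exact absurd (by simpa using hc) hnc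
  | k + 1, hj => exact ⟨k, by omega, by simpa using hc⟩

theorem main_equiv (sottoliste : List (List Int))
    (hp : Pre_esiste_sottolista_strett_crescente sottoliste) :
    esiste_sottolista_strett_crescente sottoliste = esiste_sottolista_strett_crescente_alt sottoliste := by
  induction sottoliste with
  | nil => rfl
  | cons s rest ih =>
    have hsne : s ≠ [] := by
      intro he
      obtain ⟨j, hj, -⟩ := hp 0 (by simp) (by simpa using he)
      omega
    obtain ⟨u, t, rfl⟩ := List.exists_cons_of_ne_nil hsne
    have hget : PySem.List.pyGet? (u :: t) (0 : Int) = some u := PySem.List.pyGet?_zero_cons u t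
    have hloop : pvALoop (u :: t) u 1 = true ↔ List.IsChain (· < ·) (u :: t) := by
      rw [pvALoop_iff]
      simp
    by_cases hc : List.IsChain (· < ·) (u :: t)
    · rw [esiste_sottolista_strett_crescente, hget]
      simp only [hloop.mpr hc, if_true]
      rw [esiste_sottolista_strett_crescente_alt]
      simp [List.any_cons, (pvBCheck_iff (u :: t)).mpr hc]
    · rw [esiste_sottolista_strett_crescente, hget]
      have hl : pvALoop (u :: t) u 1 = false := by
        rcases Bool.eq_false_or_eq_true (pvALoop (u :: t) u 1) with h | h
        · exact absurd (hloop.mp h) hc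
        · exact h
      have hb : pvBCheck (u :: t) = false := by
        rcases Bool.eq_false_or_eq_true (pvBCheck (u :: t)) with h | h
        · exact absurd ((pvBCheck_iff (u :: t)).mp h) hc
        · exact h
      simp only [hl, if_neg, Bool.false_eq_true, not_false_iff]
      rw [esiste_sottolista_strett_crescente_alt]
      simp only [List.any_cons, hb, Bool.false_or]
      exact ih (pre_tail _ _ hp hc)

-- ===== VERDICT (by name: the statement is the Claim_ definition above) =====
theorem esiste_sottolista_strett_crescente_spec : Claim_equal_esiste_sottolista_strett_crescente := by
  intro xs _ hp
  unfold Spec_esiste_sottolista_strett_crescente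
  exact main_equiv xs hp
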